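-- pv_equiv track=rewrite | github.com/SpaceJ0392/CodingTest | python/[PCCP 기출문제 2번]퍼즐 게임 챌린지.py | solution
-- ===== SOURCE A (Python) =====
-- def solution(diffs, times, limit):
--
--     start, end = diffs[0], max(diffs)
--     answer, lev = 0, 0
--
--     while start <= end:
--         lev = (start + end) // 2
--
--         tot_time = 0
--         for i, diff in enumerate(diffs):
--             if diff <= lev : tot_time += times[i]
--             else: tot_time += (diff - lev) * (times[i - 1] + times[i]) + times[i]
--
--         if tot_time > limit :
--             start = lev + 1
--         else:
--             end = lev - 1
--             answer = lev
--
--     return answer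
-- ===== SOURCE B (Python) =====
-- def bisect_right_ds(ds, x):
--     lo, hi = 0, len(ds)
--     while lo < hi:
--         mid = (lo + hi) // 2
--         if ds[mid] <= x:
--             lo = mid + 1
--         else:
--             hi = mid
--     return lo
--
--
-- def solution(diffs, times, limit):
--     n = len(diffs)
--     total = sum(times[:n])
--     pairs = sorted([(diffs[i], times[i - 1] + times[i]) for i in range(1, n)],
--                    key=lambda p: p[0])
--     ds = [p[0] for p in pairs]
--     # prefix sums of the weights and of diff*weight over the sorted pairs
--     pw = [0]
--     pdw = [0]
--     for d, w in pairs: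
--         pw.append(pw[-1] + w)
--         pdw.append(pdw[-1] + d * w)
--     m = n - 1
--
--     def cost(lev):
--         k = bisect_right_ds(ds, lev)
--         return total + (pdw[m] - pdw[k]) - lev * (pw[m] - pw[k])
--
--     lo, hi = diffs[0], max(diffs)
--     answer = 0
--     while lo <= hi:
--         mid = (lo + hi) // 2
--         if cost(mid) > limit:
--             lo = mid + 1
--         else:
--             hi = mid - 1
--             answer = mid
--     return answer
-- ===== Notes on version B (the rewrite author's own statement) =====
-- stated objective: alternative
-- what changed: A rescans all n puzzles to evaluate the cost at every probed level; B sorts the (diff, weight) pairs once, builds prefix sums, and evaluates each probed level's cost in O(log n) by bisection on the sorted diffs.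
import Mathlib
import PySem

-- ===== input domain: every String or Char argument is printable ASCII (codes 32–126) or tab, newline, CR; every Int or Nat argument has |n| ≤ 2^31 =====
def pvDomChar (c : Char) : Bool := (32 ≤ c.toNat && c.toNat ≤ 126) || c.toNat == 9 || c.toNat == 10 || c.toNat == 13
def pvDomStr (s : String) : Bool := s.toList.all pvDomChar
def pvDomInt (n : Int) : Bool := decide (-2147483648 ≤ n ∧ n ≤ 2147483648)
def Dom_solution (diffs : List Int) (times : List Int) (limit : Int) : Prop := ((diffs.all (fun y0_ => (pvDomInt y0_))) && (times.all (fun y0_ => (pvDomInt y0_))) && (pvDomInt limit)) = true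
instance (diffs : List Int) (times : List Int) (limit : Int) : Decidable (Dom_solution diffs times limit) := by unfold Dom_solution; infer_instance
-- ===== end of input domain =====

-- B replaces A's per-probe rescan of all puzzles by sorting the (diff, weight) pairs once and
-- evaluating each probed level from prefix sums via bisection (alternative algorithm; timing run
-- did not confirm a >=1.5x speedup on the generated inputs); equivalence proved on Pre_.


-- ===== PORT A =====
-- A's inner 'for i, diff in enumerate(diffs)' loop: total time needed at level lev
def solutionCost (diffs times : List Int) (lev : Int) : Int :=
  (PySem.List.enumerate diffs).foldl
    (fun tot p =>
      if p.2 ≤ lev then tot + PySem.List.pyGetD times p.1 0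
      else tot + ((p.2 - lev) * (PySem.List.pyGetD times (p.1 - 1) 0 + PySem.List.pyGetD times p.1 0)
                  + PySem.List.pyGetD times p.1 0)) 0

-- A's 'while start <= end' binary search (lev = (start+end)//2 written inline)
def solutionLoop (diffs times : List Int) (limit s e answer : Int) : Int :=
  if h : s ≤ e then
    if solutionCost diffs times (PySem.Int.floordiv (s + e) 2) > limit then
      solutionLoop diffs times limit (PySem.Int.floordiv (s + e) 2 + 1) e answer
    else
      solutionLoop diffs times limit s (PySem.Int.floordiv (s + e) 2 - 1) (PySem.Int.floordiv (s + e) 2)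
  else answer
termination_by (e - s + 1).toNat
decreasing_by
  all_goals
    have hb := PySem.Int.floordiv_two_mid_bounds h
    omega

def solution (diffs : List Int) (times : List Int) (limit : Int) : Int :=
  match PySem.List.max? diffs (fun x => x) with
  | none => 0        -- max(diffs) (and diffs[0]) raises on []; excluded by Pre_solution
  | some e => solutionLoop diffs times limit (PySem.List.pyGetD diffs 0 0) e 0

-- ===== PORT B =====
-- Source B's hand-written bisect_right_ds; lo and hi stay nonnegative in Python, so Nat is exact
-- ((lo+hi)//2 on nonnegative ints is Nat division)
def bisLoop (ds : List Int) (x : Int) (lo hi : Nat) : Nat :=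
  if h : lo < hi then
    if PySem.List.pyGetD ds (((lo + hi) / 2 : Nat) : Int) 0 ≤ x then bisLoop ds x ((lo + hi) / 2 + 1) hi
    else bisLoop ds x lo ((lo + hi) / 2)
  else lo
termination_by hi - lo
decreasing_by all_goals omega

def bisectRightDs (ds : List Int) (x : Int) : Nat := bisLoop ds x 0 ds.length

-- the 'for d, w in pairs' loop building the two prefix-sum lists pw, pdw
def prefixSums (pairs : List (Int × Int)) : List Int × List Int :=
  pairs.foldl
    (fun s p =>
      (s.1 ++ [PySem.List.pyGetD s.1 (-1) 0 + p.2],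
       s.2 ++ [PySem.List.pyGetD s.2 (-1) 0 + p.1 * p.2]))
    ([0], [0])

-- total = sum(times[:n])
def altTotal (diffs times : List Int) : Int :=
  (PySem.List.slice times none (some ((diffs.length : Int)))).sum

-- pairs = sorted([(diffs[i], times[i-1] + times[i]) for i in range(1, n)], key=lambda p: p[0])
def altPairs (diffs times : List Int) : List (Int × Int) :=
  PySem.List.sorted
    ((PySem.List.pyRange 1 (diffs.length : Int)).map
      (fun i => (PySem.List.pyGetD diffs i 0,
                 PySem.List.pyGetD times (i - 1) 0 + PySem.List.pyGetD times i 0)))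
    (fun p => p.1)

-- cost(lev): locate lev in the sorted diff list, then suffix sums from the prefix tables
def solutionAltCost (total : Int) (ds pw pdw : List Int) (m : Int) (lev : Int) : Int :=
  let k := bisectRightDs ds lev
  total + (PySem.List.pyGetD pdw m 0 - PySem.List.pyGetD pdw (k : Int) 0)
        - lev * (PySem.List.pyGetD pw m 0 - PySem.List.pyGetD pw (k : Int) 0)

-- the 'while lo <= hi' binary search of Source B (mid = (lo+hi)//2 written inline)
def solutionAltLoop (total : Int) (ds pw pdw : List Int) (m limit lo hi answer : Int) : Int :=
  if h : lo ≤ hi then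
    if solutionAltCost total ds pw pdw m (PySem.Int.floordiv (lo + hi) 2) > limit then
      solutionAltLoop total ds pw pdw m limit (PySem.Int.floordiv (lo + hi) 2 + 1) hi answer
    else
      solutionAltLoop total ds pw pdw m limit lo (PySem.Int.floordiv (lo + hi) 2 - 1)
        (PySem.Int.floordiv (lo + hi) 2)
  else answer
termination_by (hi - lo + 1).toNat
decreasing_by
  all_goals
    have hb := PySem.Int.floordiv_two_mid_bounds h
    omega

def solution_alt (diffs : List Int) (times : List Int) (limit : Int) : Int :=
  let pairs := altPairs diffs times
  let ds := pairs.map (fun p => p.1)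
  let pws := prefixSums pairs
  match PySem.List.max? diffs (fun x => x) with
  | none => 0        -- max(diffs) (and diffs[0]) raises on []; excluded by Pre_solution
  | some e =>
    solutionAltLoop (altTotal diffs times) ds pws.1 pws.2 ((diffs.length : Int) - 1) limit
      (PySem.List.pyGetD diffs 0 0) e 0

-- ===== PRECONDITION & SPEC =====
-- Pre_ excludes exactly the raising inputs: empty diffs (IndexError/ValueError on diffs[0]/max)
-- and times shorter than diffs (IndexError on times[i] inside the always-executed scan).
def Pre_solution (diffs : List Int) (times : List Int) (limit : Int) : Prop :=
  diffs ≠ [] ∧ diffs.length ≤ times.length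
instance (diffs : List Int) (times : List Int) (limit : Int) : Decidable (Pre_solution diffs times limit) := by
  unfold Pre_solution; infer_instance

def pvWitness_solution : List Int × List Int × Int := ([1, 3, 2], [10, 5, 8], 60)

def Spec_solution (diffs : List Int) (times : List Int) (limit : Int) (out : Int) : Prop := out = solution_alt diffs times limit
instance (diffs : List Int) (times : List Int) (limit : Int) (out : Int) : Decidable (Spec_solution diffs times limit out) := by unfold Spec_solution; infer_instance

-- ===== CLAIM (what is proved, stated in full; the proofs are below) =====
def Claim_equal_solution : Prop := ∀ (diffs : List Int) (times : List Int) (limit : Int), Dom_solution diffs times limit → Pre_solution diffs times limit → Spec_solution diffs times limit (solution diffs times limit)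

-- ===== LEMMAS AND PROOFS =====

-- running-sum tail: scanTail g l s = [s + g l₀, s + g l₀ + g l₁, …]
def scanTail {α : Type} (g : α → Int) : List α → Int → List Int
  | [], _ => []
  | p :: l, s => (s + g p) :: scanTail g l (s + g p)

theorem scanTail_getElem? {α : Type} (g : α → Int) (l : List α) (s : Int) (j : Nat)
    (hj : j < l.length) :
    (scanTail g l s)[j]? = some (s + ((l.map g).take (j + 1)).sum) := by
  induction l generalizing s j with
  | nil => simp at hj
  | cons p l ih =>
    cases j with
    | zero => simp [scanTail]
    | succ j =>
      simp only [scanTail, List.getElem?_cons_succ]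
      rw [ih _ _ (by simpa using hj)]
      simp [add_assoc]

theorem foldl_scan {α : Type} (g : α → Int) (l : List α) :
    ∀ (acc : List Int) (h : acc ≠ []),
      l.foldl (fun a p => a ++ [PySem.List.pyGetD a (-1) 0 + g p]) acc
        = acc ++ scanTail g l (acc.getLast h) := by
  induction l with
  | nil => intro acc h; simp [scanTail]
  | cons p l ih =>
    intro acc h
    simp only [List.foldl_cons]
    rw [PySem.List.pyGetD_neg_one acc 0 h,
        ih (acc ++ [acc.getLast h + g p]) (by simp)]
    simp [scanTail]

-- the prefix-sum list built by the Python append loop, read at index k ≤ len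
theorem prefix_getD {α : Type} (g : α → Int) (l : List α) (k : Nat) (hk : k ≤ l.length) :
    PySem.List.pyGetD (l.foldl (fun a p => a ++ [PySem.List.pyGetD a (-1) 0 + g p]) [0]) (k : Int) 0
      = ((l.map g).take k).sum := by
  rw [foldl_scan g l [0] (by simp)]
  rw [PySem.List.pyGetD_natCast]
  cases k with
  | zero => simp
  | succ j =>
    have hj : j < l.length := by omega
    have := scanTail_getElem? g l 0 j hj
    simp only [List.getLast_singleton, List.singleton_append]
    rw [List.getD_eq_getElem?_getD, List.getElem?_cons_succ, this]
    simp

theorem prefixSums_eq (pairs : List (Int × Int)) :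
    prefixSums pairs
      = (pairs.foldl (fun a p => a ++ [PySem.List.pyGetD a (-1) 0 + p.2]) [0],
         pairs.foldl (fun a p => a ++ [PySem.List.pyGetD a (-1) 0 + p.1 * p.2]) [0]) := by
  unfold prefixSums
  rw [PySem.List.foldl_prod_mk
    (f := fun a (p : Int × Int) => a ++ [PySem.List.pyGetD a (-1) 0 + p.2])
    (g := fun a (p : Int × Int) => a ++ [PySem.List.pyGetD a (-1) 0 + p.1 * p.2])]

-- bisect loop: on a ≤-sorted list, returns the first index whose element exceeds x,
-- within [lo, hi], given lo already below / hi already above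
theorem bisLoop_spec (ds : List Int) (x : Int) (hs : ds.Pairwise (· ≤ ·))
    (lo hi : Nat) (h1 : lo ≤ hi) (h2 : hi ≤ ds.length)
    (hlo : ∀ (j : Nat) (hj : j < ds.length), j < lo → ds[j] ≤ x)
    (hhi : ∀ (j : Nat) (hj : j < ds.length), hi ≤ j → x < ds[j]) :
    (lo ≤ bisLoop ds x lo hi ∧ bisLoop ds x lo hi ≤ hi) ∧
      (∀ (j : Nat) (hj : j < ds.length), j < bisLoop ds x lo hi → ds[j] ≤ x) ∧
      (∀ (j : Nat) (hj : j < ds.length), bisLoop ds x lo hi ≤ j → x < ds[j]) := by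
  have hmono : ∀ (i j : Nat) (hi : i < ds.length) (hj : j < ds.length), i ≤ j → ds[i] ≤ ds[j] := by
    intro i j hi hj hij
    rcases Nat.lt_or_ge i j with hlt | hge
    · exact List.pairwise_iff_getElem.mp hs i j hi hj hlt
    · have : i = j := by omega
      subst this; exact le_refl _
  rw [bisLoop]
  by_cases h : lo < hi
  · rw [dif_pos h]
    have hmlt : (lo + hi) / 2 < ds.length := by omega
    rw [PySem.List.pyGetD_natCast, List.getD_eq_getElem ds 0 hmlt]
    by_cases hc : ds[(lo + hi) / 2] ≤ x
    · rw [if_pos hc]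
      exact
        have hrec := bisLoop_spec ds x hs ((lo + hi) / 2 + 1) hi (by omega) h2
          (by
            intro j hj hjlt
            exact le_trans (hmono j ((lo + hi) / 2) hj hmlt (by omega)) hc)
          hhi
        ⟨⟨by omega, hrec.1.2⟩, hrec.2.1, hrec.2.2⟩
    · rw [if_neg hc]
      exact
        have hrec := bisLoop_spec ds x hs lo ((lo + hi) / 2) (by omega) (by omega) hlo
          (by
            intro j hj hjge
            exact lt_of_not_ge (fun hle => hc (le_trans (hmono ((lo + hi) / 2) j hmlt hj hjge) hle)))
        ⟨⟨hrec.1.1, by omega⟩, hrec.2.1, hrec.2.2⟩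
  · rw [dif_neg h]
    exact ⟨⟨le_refl _, h1⟩, fun j hj hjlt => hlo j hj hjlt,
      fun j hj hjge => hhi j hj (by omega)⟩
termination_by hi - lo
decreasing_by all_goals omega

theorem bisectRightDs_spec (ds : List Int) (x : Int) (hs : ds.Pairwise (· ≤ ·)) :
    bisectRightDs ds x ≤ ds.length ∧
      (∀ (j : Nat) (hj : j < ds.length), j < bisectRightDs ds x → ds[j] ≤ x) ∧
      (∀ (j : Nat) (hj : j < ds.length), bisectRightDs ds x ≤ j → x < ds[j]) := by
  have := bisLoop_spec ds x hs 0 ds.length (by omega) (by omega)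
    (by intro j hj hj0; omega) (by intro j hj hj0; omega)
  exact ⟨this.1.2, this.2.1, this.2.2⟩

-- A's enumerate loop as a sum over indices
theorem costA_eq_sum (diffs times : List Int) (lev : Int) :
    solutionCost diffs times lev =
      ((List.range diffs.length).map (fun (k : Nat) =>
        if PySem.List.pyGetD diffs (k : Int) 0 ≤ lev then PySem.List.pyGetD times (k : Int) 0
        else (PySem.List.pyGetD diffs (k : Int) 0 - lev) *
               (PySem.List.pyGetD times ((k : Int) - 1) 0 + PySem.List.pyGetD times (k : Int) 0)
             + PySem.List.pyGetD times (k : Int) 0)).sum := by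
  unfold solutionCost
  rw [PySem.List.foldl_congr_mem _ _
    (fun tot (p : Int × Int) => tot +
      (if p.2 ≤ lev then PySem.List.pyGetD times p.1 0
       else (p.2 - lev) * (PySem.List.pyGetD times (p.1 - 1) 0 + PySem.List.pyGetD times p.1 0)
            + PySem.List.pyGetD times p.1 0)) 0
    (by intro acc x _hx; by_cases hc : x.2 ≤ lev <;> simp [hc])]
  rw [PySem.List.foldl_add, PySem.List.enumerate_eq_map_pyRange diffs 0, List.map_map,
    PySem.List.pyRange_one, List.map_map]
  simp [PySem.List.len, Function.comp_def]

-- sum of times over range(n) is sum(times[:n])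
theorem sum_take_range (times : List Int) (n : Nat) (h : n ≤ times.length) :
    ((List.range n).map (fun (k : Nat) => PySem.List.pyGetD times (k : Int) 0)).sum
      = (times.take n).sum := by
  induction n with
  | zero => simp
  | succ j ih =>
    have hj : j < times.length := by omega
    rw [List.range_succ, List.map_append, List.sum_append, ih (by omega)]
    have htake := List.sum_take_succ times j hj
    simp [htake, PySem.List.pyGetD_natCast, List.getElem?_eq_getElem hj]

theorem sum_map_sub_mul (l : List (Int × Int)) (lev : Int) :
    (l.map (fun p => p.1 * p.2 - lev * p.2)).sum
      = (l.map (fun p => p.1 * p.2)).sum - lev * (l.map (fun p => p.2)).sum := by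
  induction l with
  | nil => simp
  | cons p l ih => simp only [List.map_cons, List.sum_cons, ih]; ring

-- A's scan equals B's prefix-sum evaluation at any level ≥ diffs[0]
set_option maxHeartbeats 1000000 in
theorem cost_eq (diffs times : List Int) (hne : diffs ≠ [])
    (hlen : diffs.length ≤ times.length) (lev : Int)
    (hlev : PySem.List.pyGetD diffs 0 0 ≤ lev) :
    solutionCost diffs times lev
      = solutionAltCost (altTotal diffs times) ((altPairs diffs times).map (fun p => p.1))
          (prefixSums (altPairs diffs times)).1 (prefixSums (altPairs diffs times)).2
          ((diffs.length : Int) - 1) lev := by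
  have hn1 : 1 ≤ diffs.length := List.length_pos_of_ne_nil hne
  set n := diffs.length with hn
  set M := n - 1 with hM
  set Fp : Int × Int → Int := fun p => if lev < p.1 then (p.1 - lev) * p.2 else 0 with hFp
  set sp := altPairs diffs times with hsp
  set ds := sp.map (fun p => p.1) with hds
  have hsplen : sp.length = M := by
    rw [hsp]; unfold altPairs
    rw [PySem.List.length_sorted, List.length_map, PySem.List.length_pyRange_one]
    omega
  have hdslen : ds.length = M := by rw [hds, List.length_map, hsplen]
  have hsorted : ds.Pairwise (· ≤ ·) := by
    rw [hds, hsp]; unfold altPairs; exact PySem.List.sorted_map_key_pairwise _ _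
  obtain ⟨hkle, hbelow, habove⟩ := bisectRightDs_spec ds lev hsorted
  set k := bisectRightDs ds lev with hk
  have hkM : k ≤ M := by omega
  have hfst : ∀ (j : Nat) (hj : j < sp.length), ds[j]'(by rw [hdslen]; omega) = (sp[j]).1 := by
    intro j hj; exact List.getElem_map _
  clear_value k
  -- left side: A's scan as  sum(times[:n]) + Σ_{i ≥ 1, diffs[i] > lev} (diffs[i]-lev)·w_i
  rw [costA_eq_sum,
    List.map_congr_left (g := fun (j : Nat) =>
      PySem.List.pyGetD times (j : Int) 0 +
      (if lev < PySem.List.pyGetD diffs (j : Int) 0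
       then (PySem.List.pyGetD diffs (j : Int) 0 - lev) *
            (PySem.List.pyGetD times ((j : Int) - 1) 0 + PySem.List.pyGetD times (j : Int) 0)
       else 0))
      (by
        intro a _ha
        by_cases hc : PySem.List.pyGetD diffs (a : Int) 0 ≤ lev
        · simp only [if_pos hc, if_neg (not_lt.mpr hc), add_zero]
        · simp only [if_neg hc, if_pos (lt_of_not_ge hc)]; ring),
    PySem.List.sum_map_add_int]
  rw [← hn, sum_take_range times n (by omega)]
  -- the F-part equals the Fp-sum over the sorted pairs
  have hFsum :
      ((List.range n).map (fun (j : Nat) =>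
        if lev < PySem.List.pyGetD diffs (j : Int) 0
        then (PySem.List.pyGetD diffs (j : Int) 0 - lev) *
             (PySem.List.pyGetD times ((j : Int) - 1) 0 + PySem.List.pyGetD times (j : Int) 0)
        else 0)).sum = (sp.map Fp).sum := by
    have hperm : (sp.map Fp).Perm
        (((PySem.List.pyRange 1 (n : Int)).map
          (fun i => (PySem.List.pyGetD diffs i 0,
                     PySem.List.pyGetD times (i - 1) 0 + PySem.List.pyGetD times i 0))).map Fp) := by
      apply List.Perm.map
      rw [hsp]; unfold altPairs; exact PySem.List.sorted_perm _ _ _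
    rw [hperm.sum_eq, List.map_map, PySem.List.pyRange_one 1 (n : Int), List.map_map]
    have hMt : ((n : Int) - 1).toNat = M := by omega
    rw [hMt]
    have hnM : n = M + 1 := by omega
    rw [hnM, List.range_succ_eq_map, List.map_cons, List.sum_cons, List.map_map]
    have h0 : ((0 : Nat) : Int) = (0 : Int) := rfl
    rw [h0, if_neg (not_lt.mpr hlev), zero_add]
    apply congrArg
    apply List.map_congr_left
    intro a _ha
    have hcast : ((Nat.succ a : Nat) : Int) = 1 + (a : Int) := by push_cast; ring
    simp only [Function.comp_apply, hFp, hcast]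
  rw [hFsum]
  -- split the sorted sum at the bisect point k
  have htd : (sp.map Fp).sum = ((sp.take k).map Fp).sum + ((sp.drop k).map Fp).sum := by
    conv_lhs => rw [← List.take_append_drop k sp]
    rw [List.map_append, List.sum_append]
  have htake0 : ((sp.take k).map Fp).sum = 0 := by
    have hz : (sp.take k).map Fp = (sp.take k).map (fun _ => (0 : Int)) := by
      apply List.map_congr_left
      intro p hp
      obtain ⟨j, hjm, hjp⟩ := List.mem_take_iff_getElem.mp hp
      have hjsp : j < sp.length := by omega
      have hle : (sp[j]).1 ≤ lev := by
        rw [← hfst j hjsp]; exact hbelow j (by omega) (by omega)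
      rw [hjp] at hle
      simp only [hFp, if_neg (not_lt.mpr hle)]
    rw [hz]; simp
  have hdropc : (sp.drop k).map Fp = (sp.drop k).map (fun p => p.1 * p.2 - lev * p.2) := by
    apply List.map_congr_left
    intro p hp
    obtain ⟨i, hi, hip⟩ := List.mem_iff_getElem.mp hp
    have hki : k + i < sp.length := by
      have := List.length_drop (l := sp) (i := k); omega
    have hgt : lev < (sp[k + i]).1 := by
      rw [← hfst (k + i) hki]; exact habove (k + i) (by omega) (by omega)
    have hpi : (sp.drop k)[i] = sp[k + i] := List.getElem_drop
    rw [hpi] at hip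
    rw [hip] at hgt
    simp only [hFp, if_pos hgt]; ring
  have hsum1 : ((sp.drop k).map (fun p => p.1 * p.2)).sum
      = (sp.map (fun p => p.1 * p.2)).sum - ((sp.map (fun p => p.1 * p.2)).take k).sum := by
    rw [List.map_drop]
    have := List.sum_take_add_sum_drop (sp.map (fun p => p.1 * p.2)) k
    omega
  have hsum2 : ((sp.drop k).map (fun p => p.2)).sum
      = (sp.map (fun p => p.2)).sum - ((sp.map (fun p => p.2)).take k).sum := by
    rw [List.map_drop]
    have := List.sum_take_add_sum_drop (sp.map (fun p => p.2)) k
    omega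
  -- the prefix tables read at k and at m
  have hpwk : PySem.List.pyGetD (prefixSums sp).1 (k : Int) 0
      = ((sp.map (fun p => p.2)).take k).sum := by
    rw [prefixSums_eq]; exact prefix_getD _ sp k (by omega)
  have hpdwk : PySem.List.pyGetD (prefixSums sp).2 (k : Int) 0
      = ((sp.map (fun p => p.1 * p.2)).take k).sum := by
    rw [prefixSums_eq]; exact prefix_getD _ sp k (by omega)
  have hmcast : ((n : Int) - 1) = ((M : Nat) : Int) := by omega
  have hpwm : PySem.List.pyGetD (prefixSums sp).1 ((n : Int) - 1) 0
      = (sp.map (fun p => p.2)).sum := by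
    rw [hmcast, prefixSums_eq]
    rw [prefix_getD _ sp M (by omega)]
    rw [show M = (sp.map (fun p => p.2)).length by simp [hsplen], List.take_length]
  have hpdwm : PySem.List.pyGetD (prefixSums sp).2 ((n : Int) - 1) 0
      = (sp.map (fun p => p.1 * p.2)).sum := by
    rw [hmcast, prefixSums_eq]
    rw [prefix_getD _ sp M (by omega)]
    rw [show M = (sp.map (fun p => p.1 * p.2)).length by simp [hsplen], List.take_length]
  -- assemble
  simp only [solutionAltCost]
  rw [← hk, hpwk, hpdwk, hpwm, hpdwm]
  have htot : altTotal diffs times = (times.take n).sum := by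
    unfold altTotal; rw [← hn, PySem.List.slice_to_natCast]
  rw [htot, htd, htake0, hdropc, sum_map_sub_mul, hsum1, hsum2]
  ring

-- the two binary searches coincide once the cost functions coincide on levels ≥ s₀
theorem loops_eq (diffs times : List Int) (total : Int) (ds pw pdw : List Int) (m d0 : Int)
    (hcost : ∀ lev, d0 ≤ lev →
      solutionCost diffs times lev = solutionAltCost total ds pw pdw m lev) :
    ∀ (limit s e answer : Int), d0 ≤ s →
      solutionLoop diffs times limit s e answer
        = solutionAltLoop total ds pw pdw m limit s e answer := by
  intro limit s e answer hs
  rw [solutionLoop, solutionAltLoop]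
  by_cases h : s ≤ e
  · have hb := PySem.Int.floordiv_two_mid_bounds h
    rw [dif_pos h, dif_pos h, hcost _ (by omega)]
    by_cases hc : solutionAltCost total ds pw pdw m (PySem.Int.floordiv (s + e) 2) > limit
    · rw [if_pos hc, if_pos hc]
      exact loops_eq diffs times total ds pw pdw m d0 hcost limit _ e answer (by omega)
    · rw [if_neg hc, if_neg hc]
      exact loops_eq diffs times total ds pw pdw m d0 hcost limit s _ _ hs
  · rw [dif_neg h, dif_neg h]
termination_by _ s e _ => (e - s + 1).toNat
decreasing_by
  all_goals
    have hb := PySem.Int.floordiv_two_mid_bounds h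
    omega

-- ===== VERDICT (by name: the statement is the Claim_ definition above) =====
theorem solution_spec : Claim_equal_solution := by
  intro diffs times limit _hdom hpre
  obtain ⟨hne, hlen⟩ := hpre
  unfold Spec_solution solution solution_alt
  cases hmax : PySem.List.max? diffs (fun x => x) with
  | none => exact absurd ((PySem.List.max?_eq_none_iff diffs _).mp hmax) hne
  | some e =>
    exact loops_eq diffs times (altTotal diffs times)
      ((altPairs diffs times).map (fun p => p.1))
      (prefixSums (altPairs diffs times)).1 (prefixSums (altPairs diffs times)).2
      ((diffs.length : Int) - 1) (PySem.List.pyGetD diffs 0 0)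
      (fun lev hlev => cost_eq diffs times hne hlen lev hlev)
      limit _ e 0 le_rfl
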